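-- pv_equiv track=rewrite | github.com/trilinos/Trilinos | packages/rol/rol_parameters/rol_parameters.py | prune_tuples
-- ===== SOURCE A (Python) =====
-- def prune_tuples(data):
--     # Sort the tuples by length in descending order
--     sorted_data = sorted(data, key=len, reverse=True)
--
--     result = []
--     leading_elements_set = set()
--
--     for tup in sorted_data:
--         # Create a leading element tuple (all but the last element)
--         leading_elements = tup[:-1]
--
--         # Check if the leading elements are already in the set
--         if leading_elements not in leading_elements_set:
--             # If not, add the tuple to the result and update the set
--             result.append(tup)
--             leading_elements_set.add(leading_elements)
--
--     return result
-- ===== SOURCE B (Python) =====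
-- def prune_tuples(data):
--     # One pass: for each prefix tup[:-1], keep the best (longest; earliest on ties)
--     # tuple together with its original index, then sort the few winners.
--     best = {}
--     for i, tup in enumerate(data):
--         lead = tup[:-1]
--         cur = best.get(lead)
--         if cur is None or len(cur[0]) < len(tup):
--             best[lead] = (tup, i)
--     winners = sorted(best.values(), key=lambda p: (-len(p[0]), p[1]))
--     return [p[0] for p in winners]
-- ===== Notes on version B (the rewrite author's own statement) =====
-- stated objective: alternative
-- what changed: Replaces sort-everything-then-scan-with-a-seen-set by a single pass that indexes the best (longest, earliest-on-ties) tuple per prefix in a dict and then sorts only the winner set by (-length, original index).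
import Mathlib
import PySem

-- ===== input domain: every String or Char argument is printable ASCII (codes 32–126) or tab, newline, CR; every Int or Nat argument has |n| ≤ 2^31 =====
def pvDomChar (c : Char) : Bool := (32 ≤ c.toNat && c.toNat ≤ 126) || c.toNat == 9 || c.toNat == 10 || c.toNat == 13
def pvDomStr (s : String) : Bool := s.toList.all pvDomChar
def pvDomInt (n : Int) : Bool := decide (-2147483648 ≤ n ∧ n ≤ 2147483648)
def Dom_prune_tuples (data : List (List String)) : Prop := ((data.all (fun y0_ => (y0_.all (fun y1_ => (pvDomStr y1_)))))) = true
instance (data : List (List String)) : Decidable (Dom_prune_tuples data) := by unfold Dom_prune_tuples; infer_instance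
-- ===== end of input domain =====

-- B replaces 'sort everything, then keep the first tuple per prefix' by 'one pass indexing the
-- best tuple per prefix in a dict, then sort only the winners' (objective: alternative).

-- ===== PORT A =====
def prune_tuples (data : List (List String)) : List (List String) :=
  let sorted_data := PySem.List.sorted data (fun t => PySem.List.len t) true
  let st := sorted_data.foldl
    (fun (st : List (List String) × PySem.Set (List String)) tup =>
      let leading_elements := PySem.List.slice tup none (some (-1))
      if !(PySem.Set.contains st.2 leading_elements) then
        (st.1 ++ [tup], PySem.Set.add st.2 leading_elements)
      else st)
    ([], PySem.Set.empty)
  st.1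

-- ===== PORT B =====
def prune_tuples_alt (data : List (List String)) : List (List String) :=
  let best := (PySem.List.enumerate data 0).foldl
    (fun (best : PySem.Dict (List String) (List String × Int)) p =>
      let lead := PySem.List.slice p.2 none (some (-1))
      match best.get? lead with
      | none => best.insert lead (p.2, p.1)
      | some cur =>
          if PySem.List.len cur.1 < PySem.List.len p.2 then best.insert lead (p.2, p.1) else best)
    PySem.Dict.empty
  let winners := PySem.List.sorted2 best.values (fun p => -(PySem.List.len p.1)) (fun p => p.2) false
  winners.map (fun p => p.1)

-- ===== PRECONDITION & SPEC =====
def Spec_prune_tuples (data : List (List String)) (out : List (List String)) : Prop := out = prune_tuples_alt data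
instance (data : List (List String)) (out : List (List String)) : Decidable (Spec_prune_tuples data out) := by unfold Spec_prune_tuples; infer_instance

-- ===== CLAIM (what is proved, stated in full; the proofs are below) =====
def Claim_equal_prune_tuples : Prop := ∀ (data : List (List String)), Dom_prune_tuples data → Spec_prune_tuples data (prune_tuples data)

-- ===== LEMMAS AND PROOFS =====

-- first-per-key filter: what A's (result, seen)-loop accumulates
def pvDff {α : Type} (key : α → List String) (seen : PySem.Set (List String)) : List α → List α
  | [] => []
  | x :: l =>
      if PySem.Set.contains seen (key x) then pvDff key seen l
      else x :: pvDff key (PySem.Set.add seen (key x)) l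

-- lexicographic sort key (-length, original index) on an enumerated tuple
def pvLex (p : Int × List String) : Lex (Int × Int) := toLex (-(PySem.List.len p.2), p.1)

-- the stable descending-length sort, decorated with original indices
def pvSE (data : List (List String)) : List (Int × List String) :=
  PySem.List.sorted (PySem.List.enumerate data 0) pvLex false

-- B's per-prefix winner predicate: (i, t) is the longest tuple with prefix q, earliest on ties
def pvP (data : List (List String)) (q t : List String) (i : Int) : Prop :=
  (i, t) ∈ PySem.List.enumerate data 0 ∧ t.dropLast = q ∧
  ∀ j s, (j, s) ∈ PySem.List.enumerate data 0 → s.dropLast = q →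
    (s.length < t.length ∨ (s.length = t.length ∧ i ≤ j))

def pvStep (d : PySem.Dict (List String) (List String × Int)) (p : Int × List String) :
    PySem.Dict (List String) (List String × Int) :=
  match d.get? p.2.dropLast with
  | none => d.insert p.2.dropLast (p.2, p.1)
  | some cur =>
      if PySem.List.len cur.1 < PySem.List.len p.2 then d.insert p.2.dropLast (p.2, p.1) else d

def pvBest (data : List (List String)) : PySem.Dict (List String) (List String × Int) :=
  (PySem.List.enumerate data 0).foldl pvStep PySem.Dict.empty

lemma pvFoldA (l : List (List String)) (acc : List (List String)) (seen : PySem.Set (List String)) :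
    l.foldl
      (fun (st : List (List String) × PySem.Set (List String)) tup =>
        if !(PySem.Set.contains st.2 tup.dropLast) then
          (st.1 ++ [tup], PySem.Set.add st.2 tup.dropLast)
        else st)
      (acc, seen)
    = (acc ++ pvDff (fun t => t.dropLast) seen l,
       l.foldl (fun s t => PySem.Set.add s t.dropLast) seen) := by
  induction l generalizing acc seen with
  | nil => simp [pvDff]
  | cons t l ih =>
      by_cases h : PySem.Set.contains seen t.dropLast = true
      · have hm : t.dropLast ∈ seen := (PySem.Set.contains_iff seen _).mp h
        simp only [List.foldl_cons, h, Bool.not_true, Bool.false_eq_true, if_false]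
        rw [ih]
        simp [pvDff, PySem.Set.add, hm]
      · have hm : t.dropLast ∉ seen := fun c => h ((PySem.Set.contains_iff seen _).mpr c)
        simp only [List.foldl_cons, eq_false_of_ne_true h, Bool.not_false, if_true]
        rw [ih]
        simp [pvDff, hm, List.append_assoc]


lemma pvA_eq (data : List (List String)) :
    prune_tuples data
      = pvDff (fun t => t.dropLast) PySem.Set.empty
          (PySem.List.sorted data (fun t => PySem.List.len t) true) := by
  simp only [prune_tuples, PySem.List.slice_to_neg_one]
  rw [pvFoldA]
  simp


lemma pvMapSndInsertBy (E : List (Int × List String)) (x : List String) (n : Int)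
    (h : ∀ p ∈ E, p.1 < n) :
    (PySem.List.insertBy (fun a b => decide (pvLex a < pvLex b)) (n, x) E).map (·.2)
      = PySem.List.insertBy
          (fun a b => decide ((fun t => PySem.List.len t) b < (fun t => PySem.List.len t) a))
          x (E.map (·.2)) := by
  induction E with
  | nil => simp [PySem.List.insertBy]
  | cons y E ih =>
      have hy := h y List.mem_cons_self
      have hb : (pvLex (n, x) < pvLex y) ↔ (PySem.List.len y.2 < PySem.List.len x) := by
        cases y with
        | mk i t =>
            simp only [pvLex, Prod.Lex.toLex_lt_toLex, PySem.List.len_eq] at hy ⊢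
            omega
      have ih2 := ih (fun p hp => h p (List.mem_cons_of_mem y hp))
      by_cases hc : PySem.List.len y.2 < PySem.List.len x
      · have hc2 : y.2.length < x.length := by simpa [PySem.List.len_eq] using hc
        simp [PySem.List.insertBy, hb, hc2]
      · have hc2 : ¬ y.2.length < x.length := by simpa [PySem.List.len_eq] using hc
        simp [PySem.List.insertBy, hb, hc2, ih2]


lemma pvSE_mem (data : List (List String)) (p : Int × List String) (hp : p ∈ pvSE data) :
    p ∈ PySem.List.enumerate data 0 := by
  exact (PySem.List.mem_sorted _ _ _ p).mp hp


lemma pvSE_snd (data : List (List String)) :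
    (pvSE data).map (·.2) = PySem.List.sorted data (fun t => PySem.List.len t) true := by
  induction data using List.reverseRecOn with
  | nil =>
      simp [pvSE, PySem.List.enumerate_nil, PySem.List.sorted]
  | append_singleton d x ih =>
      have hmem : ∀ p ∈ pvSE d, p.1 < (d.length : Int) := by
        intro p hp
        obtain ⟨k, hk, rfl⟩ := (PySem.List.mem_enumerate_iff _ _ _).mp (pvSE_mem d p hp)
        simp
        omega
      rw [pvSE, PySem.List.enumerate_append, PySem.List.sorted_eq_foldl_insertBy,
        List.foldl_append, ← PySem.List.sorted_eq_foldl_insertBy]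
      rw [PySem.List.sorted_rev_eq_foldl_insertBy, List.foldl_append,
        ← PySem.List.sorted_rev_eq_foldl_insertBy]
      simp only [PySem.List.enumerate_cons, PySem.List.enumerate_nil, List.foldl_cons,
        List.foldl_nil, Int.zero_add]
      rw [show PySem.List.sorted (PySem.List.enumerate d 0) pvLex false = pvSE d from rfl]
      rw [pvMapSndInsertBy _ _ _ hmem, ih]


lemma pvSE_pairwise (data : List (List String)) :
    (pvSE data).Pairwise (fun p q => pvLex p < pvLex q) := by
  have h1 := PySem.List.sorted_pairwise (PySem.List.enumerate data 0) pvLex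
  have hnd : ((pvSE data).map (fun p => p.1)).Nodup := by
    have hperm : (pvSE data).Perm (PySem.List.enumerate data 0) := PySem.List.sorted_perm _ _ _
    have h2 : ((PySem.List.enumerate data 0).map (fun p => p.1)).Nodup := by
      have h3 := PySem.List.pairwise_lt_enumerate data 0
      exact List.pairwise_map.mpr (h3.imp fun hlt => ne_of_lt hlt)
    exact (hperm.map (fun p => p.1)).nodup_iff.mpr h2
  have h2 : (pvSE data).Pairwise (fun a b => a.1 ≠ b.1) := List.pairwise_map.mp hnd
  refine (h1.and h2).imp ?_
  intro a b hab
  refine lt_of_le_of_ne hab.1 (fun he => hab.2 ?_)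
  have h4 : (-(PySem.List.len a.2), a.1) = (-(PySem.List.len b.2), b.1) := toLex.injective he
  exact congrArg Prod.snd h4


lemma pvDff_sublist {α : Type} (key : α → List String) (seen : PySem.Set (List String))
    (l : List α) : (pvDff key seen l).Sublist l := by
  induction l generalizing seen with
  | nil => simp [pvDff]
  | cons x l ih =>
      rw [pvDff]
      split
      · exact (ih seen).cons x
      · exact (ih (PySem.Set.add seen (key x))).cons₂ x


lemma pvDff_map {α β : Type} (key : β → List String) (f : α → β)
    (seen : PySem.Set (List String)) (l : List α) :
    pvDff key seen (l.map f) = (pvDff (fun x => key (f x)) seen l).map f := by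
  induction l generalizing seen with
  | nil => simp [pvDff]
  | cons x l ih =>
      rw [List.map_cons, pvDff, pvDff]
      split
      · exact ih seen
      · simp [ih]


lemma pvDff_keys_mem {α : Type} (key : α → List String) (l : List α)
    (seen : PySem.Set (List String)) (q : List String) :
    (∃ x ∈ pvDff key seen l, key x = q) ↔ ((∃ x ∈ l, key x = q) ∧ q ∉ seen) := by
  induction l generalizing seen with
  | nil => simp [pvDff]
  | cons x l ih =>
      rw [pvDff]
      split
      · rename_i h
        have hm : key x ∈ seen := (PySem.Set.contains_iff seen _).mp h
        rw [ih]
        constructor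
        · rintro ⟨⟨y, hy, hk⟩, hq⟩
          exact ⟨⟨y, List.mem_cons_of_mem x hy, hk⟩, hq⟩
        · rintro ⟨⟨y, hy, hk⟩, hq⟩
          rcases List.mem_cons.mp hy with rfl | hy'
          · exact absurd (hk ▸ hm) hq
          · exact ⟨⟨y, hy', hk⟩, hq⟩
      · rename_i h
        have hm : key x ∉ seen := fun c => h ((PySem.Set.contains_iff seen _).mpr c)
        constructor
        · rintro ⟨y, hy, hk⟩
          rcases List.mem_cons.mp hy with heq | hy'
          · subst heq; exact ⟨⟨y, List.mem_cons_self, hk⟩, hk ▸ hm⟩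
          · obtain ⟨⟨z, hz, hzk⟩, hq⟩ := (ih _).mp ⟨y, hy', hk⟩
            rw [PySem.Set.mem_add] at hq
            push Not at hq
            exact ⟨⟨z, List.mem_cons_of_mem x hz, hzk⟩, hq.1⟩
        · rintro ⟨⟨y, hy, hk⟩, hq⟩
          by_cases hqx : q = key x
          · exact ⟨x, List.mem_cons_self, hqx.symm⟩
          · rcases List.mem_cons.mp hy with heq | hy'
            · subst heq; exact absurd hk.symm hqx
            · obtain ⟨z, hz, hzk⟩ := (ih _).mpr
                ⟨⟨y, hy', hk⟩, by rw [PySem.Set.mem_add]; push Not; exact ⟨hq, hqx⟩⟩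
              exact ⟨z, List.mem_cons_of_mem x hz, hzk⟩


lemma pvDff_nodup_keys {α : Type} (key : α → List String) (l : List α)
    (seen : PySem.Set (List String)) :
    ((pvDff key seen l).map key).Nodup ∧ ∀ q ∈ (pvDff key seen l).map key, q ∉ seen := by
  induction l generalizing seen with
  | nil => simp [pvDff]
  | cons x l ih =>
      rw [pvDff]
      split
      · exact ih seen
      · rename_i h
        have hm : key x ∉ seen := fun c => h ((PySem.Set.contains_iff seen _).mpr c)
        obtain ⟨hnd, hns⟩ := ih (PySem.Set.add seen (key x))
        refine ⟨List.nodup_cons.mpr ⟨fun hmem => ?_, hnd⟩, ?_⟩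
        · exact hns _ hmem (by rw [PySem.Set.mem_add]; right; rfl)
        · intro q hq
          rw [List.map_cons, List.mem_cons] at hq
          rcases hq with rfl | h2
          · exact hm
          · have h3 := hns q h2
            rw [PySem.Set.mem_add] at h3
            exact fun c => h3 (Or.inl c)


lemma pvDff_min (key : Int × List String → List String) (l : List (Int × List String))
    (seen : PySem.Set (List String)) (hl : l.Pairwise (fun a b => pvLex a < pvLex b))
    (x : Int × List String) (hx : x ∈ pvDff key seen l) :
    x ∈ l ∧ ∀ y ∈ l, key y = key x → pvLex x ≤ pvLex y := by
  induction l generalizing seen with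
  | nil => simp [pvDff] at hx
  | cons y l ih =>
      rcases List.pairwise_cons.mp hl with ⟨hy, hl2⟩
      rw [pvDff] at hx
      split at hx
      · rename_i h
        have hkx : key x ∉ seen :=
          (pvDff_nodup_keys key l seen).2 (key x) (List.mem_map_of_mem hx)
        obtain ⟨h1, h2⟩ := ih seen hl2 hx
        refine ⟨List.mem_cons_of_mem _ h1, ?_⟩
        intro z hz hk
        rcases List.mem_cons.mp hz with heq | hz2
        · subst heq
          exact absurd (hk ▸ (PySem.Set.contains_iff seen _).mp h) hkx
        · exact h2 z hz2 hk
      · rcases List.mem_cons.mp hx with heq | hx2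
        · subst heq
          refine ⟨List.mem_cons_self, ?_⟩
          intro z hz hk
          rcases List.mem_cons.mp hz with heq2 | hz2
          · subst heq2; exact le_refl _
          · exact le_of_lt (hy z hz2)
        · have hkx : key x ∉ PySem.Set.add seen (key y) :=
            (pvDff_nodup_keys key l _).2 (key x) (List.mem_map_of_mem hx2)
          obtain ⟨h1, h2⟩ := ih _ hl2 hx2
          refine ⟨List.mem_cons_of_mem _ h1, ?_⟩
          intro z hz hk
          rcases List.mem_cons.mp hz with heq2 | hz2
          · subst heq2
            exact absurd (by rw [PySem.Set.mem_add]; right; exact hk.symm) hkx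
          · exact h2 z hz2 hk


lemma pvBest_append (d : List (List String)) (x : List String) :
    pvBest (d ++ [x]) = pvStep (pvBest d) ((d.length : Int), x) := by
  rw [pvBest, PySem.List.enumerate_append, List.foldl_append]
  simp only [PySem.List.enumerate_cons, PySem.List.enumerate_nil, List.foldl_cons,
    List.foldl_nil, Int.zero_add]
  rfl


lemma pvBest_keys_nodup (data : List (List String)) : (pvBest data).keys.Nodup := by
  induction data using List.reverseRecOn with
  | nil => exact PySem.Dict.nodup_keys_empty
  | append_singleton d x ih =>
      rw [pvBest_append]
      unfold pvStep
      split
      · exact PySem.Dict.nodup_keys_insert _ _ _ ih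
      · split
        · exact PySem.Dict.nodup_keys_insert _ _ _ ih
        · exact ih


lemma pvBest_keys_mem (data : List (List String)) (q : List String) :
    q ∈ (pvBest data).keys ↔ ∃ s ∈ data, s.dropLast = q := by
  induction data using List.reverseRecOn generalizing q with
  | nil => simp [pvBest, PySem.List.enumerate_nil, PySem.Dict.keys_empty]
  | append_singleton d x ih =>
      have hright : (∃ s ∈ d ++ [x], s.dropLast = q) ↔
          ((∃ s ∈ d, s.dropLast = q) ∨ q = x.dropLast) := by
        constructor
        · rintro ⟨s, hs, hk⟩
          rcases List.mem_append.mp hs with h1 | h2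
          · exact Or.inl ⟨s, h1, hk⟩
          · right; rw [← hk, List.mem_singleton.mp h2]
        · rintro (⟨s, hs, hk⟩ | rfl)
          · exact ⟨s, List.mem_append_left _ hs, hk⟩
          · exact ⟨x, List.mem_append_right _ (List.mem_singleton_self x), rfl⟩
      rw [pvBest_append, hright]
      unfold pvStep
      split
      · rw [PySem.Dict.mem_keys_insert, ih q]
        exact Or.comm
      · rename_i cur heq
        have hx : x.dropLast ∈ (pvBest d).keys := by
          rw [← PySem.Dict.contains_iff_mem_keys, PySem.Dict.contains_eq_isSome_get?, heq]
          rfl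
        split
        · rw [PySem.Dict.mem_keys_insert, ih q]
          exact Or.comm
        · rw [ih q]
          constructor
          · exact Or.inl
          · rintro (h1 | rfl)
            · exact h1
            · exact (ih _).mp hx


lemma pvBest_get?_char (data : List (List String)) (q t : List String) (i : Int)
    (h : (pvBest data).get? q = some (t, i)) : pvP data q t i := by
  induction data using List.reverseRecOn generalizing q t i with
  | nil => simp [pvBest, PySem.List.enumerate_nil, PySem.Dict.get?_empty] at h
  | append_singleton d x ih =>
      rw [pvBest_append] at h
      have hmemx : ((d.length : Int), x) ∈ PySem.List.enumerate (d ++ [x]) 0 := by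
        rw [PySem.List.enumerate_append]
        simp [PySem.List.enumerate_cons, PySem.List.enumerate_nil]
      have hlift : ∀ p : Int × List String, p ∈ PySem.List.enumerate d 0 →
          p ∈ PySem.List.enumerate (d ++ [x]) 0 := by
        intro p hp
        rw [PySem.List.enumerate_append]
        exact List.mem_append_left _ hp
      have hsplit : ∀ p : Int × List String, p ∈ PySem.List.enumerate (d ++ [x]) 0 →
          p ∈ PySem.List.enumerate d 0 ∨ p = ((d.length : Int), x) := by
        intro p hp
        rw [PySem.List.enumerate_append] at hp
        rcases List.mem_append.mp hp with h1 | h2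
        · exact Or.inl h1
        · right
          simpa [PySem.List.enumerate_cons, PySem.List.enumerate_nil] using h2
      have hidx : ∀ p : Int × List String, p ∈ PySem.List.enumerate d 0 →
          p.1 < (d.length : Int) := by
        intro p hp
        obtain ⟨k, hk, rfl⟩ := (PySem.List.mem_enumerate_iff _ _ _).mp hp
        simp
        omega
      unfold pvStep at h
      split at h
      · rename_i heq
        rw [PySem.Dict.get?_insert] at h
        split_ifs at h with hq
        · obtain ⟨rfl, rfl⟩ : t = x ∧ i = (d.length : Int) := by
            simpa using h.symm
          refine ⟨hmemx, hq.symm, ?_⟩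
          intro j s hjs hpre
          rcases hsplit _ hjs with h1 | h1
          · exfalso
            have hnok : q ∉ (pvBest d).keys := by
              rw [← PySem.Dict.contains_iff_mem_keys]
              intro hc
              rw [(PySem.Dict.get?_eq_none_iff_contains _ _).mp (hq ▸ heq)] at hc
              exact Bool.false_ne_true hc
            obtain ⟨k, hk, hpk⟩ := (PySem.List.mem_enumerate_iff _ _ _).mp h1
            have hs : s ∈ d := by
              have := congrArg Prod.snd hpk
              simp only at this
              rw [this]
              exact List.getElem_mem hk
            exact hnok ((pvBest_keys_mem d q).mpr ⟨s, hs, hpre⟩)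
          · have h2 := congrArg Prod.snd h1
            simp only at h2
            subst h2
            have h3 := congrArg Prod.fst h1
            simp only at h3
            exact Or.inr ⟨rfl, le_of_eq h3.symm⟩
        · obtain ⟨hm, hpre, hbd⟩ := ih q t i h
          refine ⟨hlift _ hm, hpre, ?_⟩
          intro j s hjs hp2
          rcases hsplit _ hjs with h1 | h1
          · exact hbd j s h1 hp2
          · exfalso
            have h2 := congrArg Prod.snd h1
            simp only at h2
            exact hq (by rw [← hp2, h2])
      · rename_i cur heq
        split_ifs at h with hlen
        · rw [PySem.Dict.get?_insert] at h
          split_ifs at h with hq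
          · obtain ⟨rfl, rfl⟩ : t = x ∧ i = (d.length : Int) := by
              simpa using h.symm
            obtain ⟨hmc, hprec, hbdc⟩ := ih q cur.1 cur.2 (by rw [hq]; exact heq)
            have hcur : cur.1.length < t.length := by
              have h5 := hlen
              dsimp only at h5
              simp only [PySem.List.len_eq] at h5
              omega
            refine ⟨hmemx, hq.symm, ?_⟩
            intro j s hjs hpre
            rcases hsplit _ hjs with h1 | h1
            · left
              have := hbdc j s h1 hpre
              omega
            · have h2 := congrArg Prod.snd h1
              simp only at h2
              subst h2
              have h3 := congrArg Prod.fst h1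
              simp only at h3
              exact Or.inr ⟨rfl, le_of_eq h3.symm⟩
          · obtain ⟨hm, hpre, hbd⟩ := ih q t i h
            refine ⟨hlift _ hm, hpre, ?_⟩
            intro j s hjs hp2
            rcases hsplit _ hjs with h1 | h1
            · exact hbd j s h1 hp2
            · exfalso
              have h2 := congrArg Prod.snd h1
              simp only at h2
              exact hq (by rw [← hp2, h2])
        · obtain ⟨hm, hpre, hbd⟩ := ih q t i h
          refine ⟨hlift _ hm, hpre, ?_⟩
          intro j s hjs hp2
          rcases hsplit _ hjs with h1 | h1
          · exact hbd j s h1 hp2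
          · have h2 := congrArg Prod.snd h1
            simp only at h2
            subst h2
            have h3 := congrArg Prod.fst h1
            simp only at h3
            by_cases hq : q = s.dropLast
            · have hcur : cur = (t, i) := by
                have := heq
                rw [← hq] at this
                rw [h] at this
                exact (Option.some.injEq _ _ ▸ this).symm
              have hxle : s.length ≤ t.length := by
                rw [hcur] at hlen
                simp only [PySem.List.len_eq] at hlen
                omega
              rcases lt_or_eq_of_le hxle with h4 | h4
              · exact Or.inl h4
              · right
                refine ⟨h4, ?_⟩
                have := hidx _ hm
                omega
            · exact absurd hp2.symm hq


lemma pvP_unique (data : List (List String)) (q t t' : List String) (i i' : Int)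
    (h : pvP data q t i) (h' : pvP data q t' i') : t = t' ∧ i = i' := by
  obtain ⟨hm, hpre, hbd⟩ := h
  obtain ⟨hm2, hpre2, hbd2⟩ := h'
  have b1 := hbd _ _ hm2 hpre2
  have b2 := hbd2 _ _ hm hpre
  have hi : i = i' := by omega
  subst hi
  obtain ⟨k, hk, hpk⟩ := (PySem.List.mem_enumerate_iff _ _ _).mp hm
  obtain ⟨k2, hk2, hpk2⟩ := (PySem.List.mem_enumerate_iff _ _ _).mp hm2
  have h1 := congrArg Prod.fst hpk
  have h2 := congrArg Prod.fst hpk2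
  simp only at h1 h2
  have hkk : k = k2 := by omega
  subst hkk
  have h3 := congrArg Prod.snd hpk
  have h4 := congrArg Prod.snd hpk2
  simp only at h3 h4
  exact ⟨h3.trans h4.symm, rfl⟩


lemma pvDff_SE_char (data : List (List String)) (p : Int × List String)
    (hp : p ∈ pvDff (fun r => r.2.dropLast) PySem.Set.empty (pvSE data)) :
    pvP data p.2.dropLast p.2 p.1 := by
  cases p with
  | mk i t =>
      obtain ⟨hmem, hmin⟩ := pvDff_min (fun r => r.2.dropLast) (pvSE data) PySem.Set.empty
        (pvSE_pairwise data) (i, t) hp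
      refine ⟨pvSE_mem _ _ hmem, rfl, ?_⟩
      intro j s hjs hpre
      have hjs2 : (j, s) ∈ pvSE data := (PySem.List.mem_sorted _ _ _ _).mpr hjs
      have hle := hmin (j, s) hjs2 hpre
      simp only [pvLex, PySem.List.len_eq, Prod.Lex.toLex_le_toLex] at hle
      dsimp only at hle ⊢
      omega


lemma pvItems_perm (data : List (List String)) :
    (pvBest data).items.Perm
      ((pvDff (fun r => r.2.dropLast) PySem.Set.empty (pvSE data)).map
        (fun p => (p.2.dropLast, (p.2, p.1)))) := by
  have hndk := pvBest_keys_nodup data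
  have hitems : (pvBest data).items.Nodup := by
    have hkm : ((pvBest data).items.map (fun p => p.1)).Nodup := by
      simpa [PySem.Dict.keys] using hndk
    exact List.Nodup.of_map (fun p => p.1) hkm
  have hdffnd := (pvDff_nodup_keys (fun r : Int × List String => r.2.dropLast)
    (pvSE data) PySem.Set.empty).1
  have hRnd : ((pvDff (fun r : Int × List String => r.2.dropLast) PySem.Set.empty
      (pvSE data)).map (fun p => (p.2.dropLast, (p.2, p.1)))).Nodup := by
    refine List.Nodup.of_map (fun p => p.1) ?_
    simpa [List.map_map, Function.comp] using hdffnd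
  rw [List.perm_ext_iff_of_nodup hitems hRnd]
  rintro ⟨q, v⟩
  constructor
  · intro hmem
    have hget : (pvBest data).get? q = some v := PySem.Dict.get?_of_mem_items _ hmem hndk
    obtain ⟨t, i⟩ := v
    have hP := pvBest_get?_char data q t i hget
    have hex : ∃ r ∈ pvSE data, r.2.dropLast = q :=
      ⟨(i, t), (PySem.List.mem_sorted _ _ _ _).mpr hP.1, hP.2.1⟩
    obtain ⟨p, hpd, hpk2⟩ := (pvDff_keys_mem (fun r : Int × List String => r.2.dropLast)
      (pvSE data) PySem.Set.empty q).mpr ⟨hex, by simp [PySem.Set.empty]⟩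
    have hPp := pvDff_SE_char data p hpd
    rw [hpk2] at hPp
    obtain ⟨ht, hi⟩ := pvP_unique data q p.2 t p.1 i hPp hP
    refine List.mem_map.mpr ⟨p, hpd, ?_⟩
    rw [hpk2, ht, hi]
  · intro hmem
    obtain ⟨p, hpd, heq2⟩ := List.mem_map.mp hmem
    have hPp := pvDff_SE_char data p hpd
    have hq : p.2.dropLast = q := congrArg Prod.fst heq2
    have hv : (p.2, p.1) = v := congrArg Prod.snd heq2
    rw [hq] at hPp
    obtain ⟨k, hk, hpk⟩ := (PySem.List.mem_enumerate_iff _ _ _).mp hPp.1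
    have hpd2 : p.2 ∈ data := by
      have h2 := congrArg Prod.snd hpk
      simp only at h2
      rw [h2]
      exact List.getElem_mem hk
    have hkeys : q ∈ (pvBest data).keys := (pvBest_keys_mem data q).mpr ⟨p.2, hpd2, hq⟩
    obtain ⟨⟨t2, i2⟩, hw⟩ : ∃ w, (pvBest data).get? q = some w := by
      rcases hw : (pvBest data).get? q with _ | w
      · rw [PySem.Dict.get?_eq_none_iff_contains] at hw
        rw [← PySem.Dict.contains_iff_mem_keys, hw] at hkeys
        exact absurd hkeys Bool.false_ne_true
      · exact ⟨w, rfl⟩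
    have hP2 := pvBest_get?_char data q t2 i2 hw
    obtain ⟨ht, hi⟩ := pvP_unique data q p.2 t2 p.1 i2 hPp hP2
    have hveq : v = (t2, i2) := by rw [← hv, ht, hi]
    rw [hveq]
    exact PySem.Dict.mem_items_of_get?_eq_some _ hw


lemma pvSorted2_lex {α : Type} (xs : List α) (k1 k2 : α → Int) :
    PySem.List.sorted2 xs k1 k2 false
      = PySem.List.sorted xs (fun x => toLex (k1 x, k2 x)) false := by
  rw [PySem.List.sorted_eq_foldl_insertBy]
  simp only [PySem.List.sorted2, Bool.false_eq_true, if_false]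
  congr 1
  funext acc x
  congr 1
  funext a b
  simp only [← decide_not, ← Bool.decide_and, ← Bool.decide_or, decide_eq_decide,
    Prod.Lex.toLex_lt_toLex]
  omega


-- ===== VERDICT (by name: the statement is the Claim_ definition above) =====
theorem prune_tuples_spec : Claim_equal_prune_tuples := by
  intro data _
  unfold Spec_prune_tuples
  have hA : prune_tuples data
      = (pvDff (fun r : Int × List String => r.2.dropLast) PySem.Set.empty
          (pvSE data)).map (fun p => p.2) := by
    rw [pvA_eq, ← pvSE_snd, pvDff_map]
  have hB : prune_tuples_alt data
      = (PySem.List.sorted2 (pvBest data).values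
          (fun p => -(PySem.List.len p.1)) (fun p => p.2) false).map (fun p => p.1) := by
    simp only [prune_tuples_alt, PySem.List.slice_to_neg_one]
    rfl
  have hperm : ((pvDff (fun r : Int × List String => r.2.dropLast) PySem.Set.empty
      (pvSE data)).map (fun p => (p.2, p.1))).Perm (pvBest data).values := by
    have h1 := ((pvItems_perm data).map (fun p => p.2)).symm
    simpa [List.map_map, Function.comp] using h1
  have hpair : ((pvDff (fun r : Int × List String => r.2.dropLast) PySem.Set.empty
      (pvSE data)).map (fun p => (p.2, p.1))).Pairwise
      (fun a b => (fun p : List String × Int => toLex (-(PySem.List.len p.1), p.2)) a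
        < (fun p : List String × Int => toLex (-(PySem.List.len p.1), p.2)) b) := by
    refine List.pairwise_map.mpr ?_
    have hp := List.Pairwise.sublist
      (pvDff_sublist (fun r : Int × List String => r.2.dropLast) PySem.Set.empty (pvSE data))
      (pvSE_pairwise data)
    exact hp.imp (fun h => h)
  have hsorted := PySem.List.sorted_eq_of_perm_of_pairwise_lt (pvBest data).values
    ((pvDff (fun r : Int × List String => r.2.dropLast) PySem.Set.empty
      (pvSE data)).map (fun p => (p.2, p.1)))
    (fun p : List String × Int => toLex (-(PySem.List.len p.1), p.2)) hperm hpair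
  rw [hA, hB, pvSorted2_lex, hsorted, List.map_map]
  rfl
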